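-- pv_equiv track=rewrite | github.com/daormar/geno-debasher | utils/genop_query_gdc_metadata.py | group_formatted_info_by_donor
-- ===== SOURCE A (Python) =====
-- def filter_fields(entry, field_list):
--     if(field_list):
--         filtered_entry = []
--         for field in field_list:
--             filtered_entry.append(entry[field])
--         return filtered_entry
--     else:
--         return entry
--
-- def group_formatted_info_by_donor(formatted_info, field_list):
--     # Create and populate map to make grouping easier
--     group_map = {}
--     for elem in formatted_info:
--         case_id_idx = 0
--         if(elem[case_id_idx] in group_map):
--             group_map[elem[case_id_idx]].append(
--                 filter_fields(elem, field_list))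
--         else:
--             group_map[elem[case_id_idx]] = []
--             group_map[elem[case_id_idx]].append(
--                 filter_fields(elem, field_list))
--     # Create grouped info
--     formatted_info_grouped = []
--     for key in group_map:
--         tmplist = []
--         for elem in group_map[key]:
--             if(tmplist):
--                 tmplist.append((";"))
--             tmplist.append(elem)
--         flattmplist = [item for sublist in tmplist for item in sublist]
--         formatted_info_grouped.append(flattmplist)
--
--     return formatted_info_grouped
-- ===== SOURCE B (Python) =====
-- def filter_fields(entry, field_list):
--     if field_list:
--         return [entry[f] for f in field_list]
--     return entry
--
-- def group_formatted_info_by_donor(formatted_info, field_list):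
--     # One pass: keep an ordered dict case_id -> already-flattened row.
--     grouped = {}
--     for elem in formatted_info:
--         key = elem[0]
--         filtered = filter_fields(elem, field_list)
--         if key in grouped:
--             grouped[key].append(";")
--             grouped[key].extend(filtered)
--         else:
--             grouped[key] = list(filtered)
--     return list(grouped.values())
-- ===== Notes on version B (the rewrite author's own statement) =====
-- stated objective: simpler
-- what changed: B fuses A's group-then-flatten two passes into one pass that keeps an ordered dict of already-flattened rows (appending ';' and extending in place), returning the dict's values directly.
import Mathlib
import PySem

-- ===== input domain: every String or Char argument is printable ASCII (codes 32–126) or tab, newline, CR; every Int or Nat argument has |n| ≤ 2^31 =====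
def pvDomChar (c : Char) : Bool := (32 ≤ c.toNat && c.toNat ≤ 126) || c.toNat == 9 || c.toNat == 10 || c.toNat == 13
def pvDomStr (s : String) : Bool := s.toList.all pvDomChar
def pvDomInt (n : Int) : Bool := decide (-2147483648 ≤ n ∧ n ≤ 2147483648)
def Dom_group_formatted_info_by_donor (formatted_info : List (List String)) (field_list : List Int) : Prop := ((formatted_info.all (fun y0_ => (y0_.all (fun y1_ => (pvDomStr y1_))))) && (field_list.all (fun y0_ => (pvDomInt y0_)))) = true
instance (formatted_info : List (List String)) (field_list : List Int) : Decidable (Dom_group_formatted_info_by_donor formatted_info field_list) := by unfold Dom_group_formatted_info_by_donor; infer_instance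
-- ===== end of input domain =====

-- B fuses A's group-then-flatten two passes into one pass over an ordered dict of
-- already-flattened rows; return values only are compared (neither mutates its input).

-- ===== PORT A =====
-- filter_fields: entry[field] is Python indexing (negative from the end); outside Pre_ the
-- .getD "" fallback is never reached.
def pvFilterFieldsA (entry : List String) (field_list : List Int) : List String :=
  if field_list ≠ [] then
    field_list.foldl (fun acc f => acc ++ [(PySem.List.pyGet? entry f).getD ""]) []
  else
    entry

def group_formatted_info_by_donor (formatted_info : List (List String)) (field_list : List Int) : List (List String) :=
  -- first loop: populate group_map (dict case_id -> list of filtered rows)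
  let group_map : PySem.Dict String (List (List String)) :=
    formatted_info.foldl (fun gm elem =>
      let key := (PySem.List.pyGet? elem 0).getD ""   -- elem[case_id_idx]; Pre_ guarantees elem ≠ []
      if gm.contains key then
        gm.insert key (gm.getD key [] ++ [pvFilterFieldsA elem field_list])
      else
        let gm := gm.insert key ([] : List (List String))  -- group_map[...] = []
        gm.insert key (gm.getD key [] ++ [pvFilterFieldsA elem field_list])) PySem.Dict.empty
  -- second loop: for key in group_map: build tmplist then flatten
  group_map.keys.foldl (fun acc key =>
    let tmplist : List (List String) :=
      (group_map.getD key []).foldl (fun t e =>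
        (if t ≠ [] then t ++ [[";"]] else t) ++ [e]) []
      -- the Python ";" element is the 1-char string; flattening it yields exactly [";"],
      -- so it is ported as the singleton list [";"] (exact because len(";") = 1)
    acc ++ [tmplist.flatten]) []

-- ===== PORT B =====
def pvFilterFieldsB (entry : List String) (field_list : List Int) : List String :=
  match field_list with
  | [] => entry
  | _ => field_list.map (fun f => (PySem.List.pyGet? entry f).getD "")

def group_formatted_info_by_donor_alt (formatted_info : List (List String)) (field_list : List Int) : List (List String) :=
  (formatted_info.foldl (fun d elem =>
    let key := (PySem.List.pyGet? elem 0).getD ""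
    let filtered := pvFilterFieldsB elem field_list
    match d.get? key with
    | some l => d.insert key (l ++ ";" :: filtered)   -- append ";" then extend
    | none   => d.insert key filtered)                -- grouped[key] = list(filtered)
    (PySem.Dict.empty : PySem.Dict String (List String))).values

-- ===== PRECONDITION & SPEC =====
-- Pre_ excludes exactly the inputs where A raises: an empty row (elem[0] IndexError) or a
-- field index out of Python range for some row (IndexError in filter_fields).
def Pre_group_formatted_info_by_donor (formatted_info : List (List String)) (field_list : List Int) : Prop :=
  ∀ elem ∈ formatted_info, elem ≠ [] ∧ ∀ f ∈ field_list, PySem.Raise.InRange elem.length f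
instance (formatted_info : List (List String)) (field_list : List Int) : Decidable (Pre_group_formatted_info_by_donor formatted_info field_list) := by unfold Pre_group_formatted_info_by_donor; infer_instance

def pvWitness_group_formatted_info_by_donor : List (List String) × List Int :=
  ([["c1", "a", "b"], ["c2", "x", "y"], ["c1", "p", "q"]], [0, 2])

def Spec_group_formatted_info_by_donor (formatted_info : List (List String)) (field_list : List Int) (out : List (List String)) : Prop := out = group_formatted_info_by_donor_alt formatted_info field_list
instance (formatted_info : List (List String)) (field_list : List Int) (out : List (List String)) : Decidable (Spec_group_formatted_info_by_donor formatted_info field_list out) := by unfold Spec_group_formatted_info_by_donor; infer_instance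

-- ===== CLAIM (what is proved, stated in full; the proofs are below) =====
def Claim_equal_group_formatted_info_by_donor : Prop := ∀ (formatted_info : List (List String)) (field_list : List Int), Dom_group_formatted_info_by_donor formatted_info field_list → Pre_group_formatted_info_by_donor formatted_info field_list → Spec_group_formatted_info_by_donor formatted_info field_list (group_formatted_info_by_donor formatted_info field_list)

-- ===== LEMMAS AND PROOFS =====

theorem filter_eq (entry : List String) (field_list : List Int) :
    pvFilterFieldsA entry field_list = pvFilterFieldsB entry field_list := by
  cases field_list with
  | nil => simp [pvFilterFieldsA, pvFilterFieldsB]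
  | cons f fs =>
    simp only [pvFilterFieldsA, pvFilterFieldsB]
    rw [if_pos (by simp)]
    rw [PySem.List.foldl_append_singleton_eq_map, List.nil_append]

-- A's inner tmplist step
def pvStep (t : List (List String)) (e : List String) : List (List String) :=
  (if t ≠ [] then t ++ [[";"]] else t) ++ [e]

-- A's flattened joined row for one group
def pvJoin (g : List (List String)) : List String :=
  (g.foldl pvStep []).flatten

theorem foldl_step_ne_nil (g : List (List String)) (t : List (List String)) (h : t ≠ [] ∨ g ≠ []) :
    g.foldl pvStep t ≠ [] := by
  induction g generalizing t with
  | nil => simpa using h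
  | cons e g ih =>
    simp only [List.foldl_cons]
    exact ih _ (Or.inl (by simp [pvStep]))

theorem pvJoin_snoc (g : List (List String)) (e : List String) :
    pvJoin (g ++ [e]) = if g = [] then e else pvJoin g ++ ";" :: e := by
  unfold pvJoin
  rw [List.foldl_append]
  by_cases hg : g = []
  · subst hg; simp [pvStep]
  · rw [if_neg hg]
    have hne : g.foldl pvStep [] ≠ [] := foldl_step_ne_nil g [] (Or.inr hg)
    simp [pvStep, hne]

-- the key of a row, as both ports compute it
def pvKey (elem : List String) : String := (PySem.List.pyGet? elem 0).getD ""

-- one A-side loop step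
def pvStepA (fl : List Int) (gm : PySem.Dict String (List (List String))) (elem : List String) :
    PySem.Dict String (List (List String)) :=
  let key := pvKey elem
  if gm.contains key then
    gm.insert key (gm.getD key [] ++ [pvFilterFieldsA elem fl])
  else
    let gm := gm.insert key ([] : List (List String))
    gm.insert key (gm.getD key [] ++ [pvFilterFieldsA elem fl])

-- one B-side loop step
def pvStepB (fl : List Int) (d : PySem.Dict String (List String)) (elem : List String) :
    PySem.Dict String (List String) :=
  let key := pvKey elem
  let filtered := pvFilterFieldsB elem fl
  match d.get? key with
  | some l => d.insert key (l ++ ";" :: filtered)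
  | none   => d.insert key filtered

-- loop invariant: same keys, keys nodup, every stored group nonempty, and B stores the join
theorem loop_inv (fl : List Int) (l : List (List String))
    (gm : PySem.Dict String (List (List String))) (d : PySem.Dict String (List String))
    (hk : d.keys = gm.keys) (hnd : gm.keys.Nodup)
    (hne : ∀ k, gm.contains k = true → gm.getD k [] ≠ [])
    (hv : ∀ k, d.getD k [] = pvJoin (gm.getD k [])) :
    (l.foldl (pvStepB fl) d).keys = (l.foldl (pvStepA fl) gm).keys ∧
    (l.foldl (pvStepA fl) gm).keys.Nodup ∧
    (∀ k, (l.foldl (pvStepA fl) gm).contains k = true → (l.foldl (pvStepA fl) gm).getD k [] ≠ []) ∧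
    (∀ k, (l.foldl (pvStepB fl) d).getD k [] = pvJoin ((l.foldl (pvStepA fl) gm).getD k [])) := by
  induction l generalizing gm d with
  | nil => exact ⟨hk, hnd, hne, hv⟩
  | cons elem l ih =>
    simp only [List.foldl_cons]
    set key := pvKey elem with hkey
    have hcd : d.contains key = gm.contains key := by
      rw [PySem.Dict.contains_eq_decide_mem_keys, PySem.Dict.contains_eq_decide_mem_keys, hk]
    have hget : d.get? key = none ↔ gm.contains key = false := by
      rw [PySem.Dict.get?_eq_none_iff_contains, hcd]
    -- compute the two step results
    by_cases hc : gm.contains key = true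
    · -- existing key
      have hgne : gm.getD key [] ≠ [] := hne key hc
      obtain ⟨l0, hl0⟩ : ∃ l0, d.get? key = some l0 := by
        cases h : d.get? key with
        | none => exact absurd (hget.mp h) (by simp [hc])
        | some v => exact ⟨v, rfl⟩
      have hstepA : pvStepA fl gm elem = gm.insert key (gm.getD key [] ++ [pvFilterFieldsA elem fl]) := by
        simp [pvStepA, ← hkey, hc]
      have hstepB : pvStepB fl d elem = d.insert key (d.getD key [] ++ ";" :: pvFilterFieldsB elem fl) := by
        rw [PySem.Dict.getD_of_get?_eq_some d [] hl0]
        simp [pvStepB, ← hkey, hl0]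
      rw [hstepA, hstepB]
      refine ih _ _ ?_ ?_ ?_ ?_
      · rw [PySem.Dict.keys_insert_of_contains _ _ (by rw [hcd]; exact hc),
            PySem.Dict.keys_insert_of_contains _ _ hc, hk]
      · rw [PySem.Dict.keys_insert_of_contains _ _ hc]; exact hnd
      · intro k hck
        rw [PySem.Dict.getD_insert]
        split_ifs with hkk
        · simp
        · exact hne k (by rwa [PySem.Dict.contains_insert, show (k == key) = false by simpa using hkk, Bool.false_or] at hck)
      · intro k
        rw [PySem.Dict.getD_insert, PySem.Dict.getD_insert]
        split_ifs with hkk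
        · rw [pvJoin_snoc, if_neg hgne, hv key, filter_eq]
        · exact hv k
    · -- new key: A inserts [] then overwrites with [filtered]; B inserts filtered
      have hc' : gm.contains key = false := by simpa using hc
      have hstepA : pvStepA fl gm elem = gm.insert key [pvFilterFieldsA elem fl] := by
        simp [pvStepA, ← hkey, hc', PySem.Dict.insert_insert_self, PySem.Dict.getD_insert_self]
      have hstepB : pvStepB fl d elem = d.insert key (pvFilterFieldsB elem fl) := by
        simp [pvStepB, ← hkey, hget.mpr hc']
      rw [hstepA, hstepB]
      have hnotmem : key ∉ gm.keys := by
        rw [← PySem.Dict.contains_iff_mem_keys]; simp [hc']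
      refine ih _ _ ?_ ?_ ?_ ?_
      · rw [PySem.Dict.keys_insert_of_not_contains _ _ (by rw [hcd]; exact hc'),
            PySem.Dict.keys_insert_of_not_contains _ _ hc', hk]
      · rw [PySem.Dict.keys_insert_of_not_contains _ _ hc']
        exact List.Nodup.append hnd (List.nodup_singleton _) (by simpa using hnotmem)
      · intro k hck
        rw [PySem.Dict.getD_insert]
        split_ifs with hkk
        · simp
        · exact hne k (by rwa [PySem.Dict.contains_insert, show (k == key) = false by simpa using hkk, Bool.false_or] at hck)
      · intro k
        rw [PySem.Dict.getD_insert, PySem.Dict.getD_insert]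
        split_ifs with hkk
        · rw [← filter_eq]; simp [pvJoin, pvStep]
        · exact hv k

-- ===== VERDICT (by name: the statement is the Claim_ definition above) =====
theorem group_formatted_info_by_donor_spec : Claim_equal_group_formatted_info_by_donor := by
  intro formatted_info field_list _ _
  unfold Spec_group_formatted_info_by_donor
  unfold group_formatted_info_by_donor group_formatted_info_by_donor_alt
  have h := loop_inv field_list formatted_info PySem.Dict.empty PySem.Dict.empty
    (by simp [PySem.Dict.keys_empty]) (by simp [PySem.Dict.keys_empty])
    (by intro k hk; simp [PySem.Dict.contains_empty] at hk)
    (by intro k; simp [PySem.Dict.getD_empty, pvJoin])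
  obtain ⟨hk, hnd, _, hv⟩ := h
  set gm := formatted_info.foldl (pvStepA field_list) PySem.Dict.empty with hgm
  set d := formatted_info.foldl (pvStepB field_list) PySem.Dict.empty with hd
  show gm.keys.foldl _ [] = d.values
  rw [PySem.List.foldl_append_singleton_eq_map]
  rw [PySem.Dict.values_eq_map_keys d (hk ▸ hnd) [], hk]
  exact List.map_congr_left (fun k _ => (hv k).symm)
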